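-- pv_equiv track=rewrite | github.com/l33zard/sc1003-mini-project | Mini Project (5).py | count_student_by_school
-- ===== SOURCE A (Python) =====
-- def count_student_by_school(student):
--     schools = {}
--     for student_id, student_data in student.items():
--         school = student_data['School']
--         if school not in schools:
--             schools[school] = []
--         schools[school].append(student_id)
--     return schools
-- ===== SOURCE B (Python) =====
-- def count_student_by_school(student):
--     # Pass 1: distinct schools in order of first appearance.
--     schools = []
--     for data in student.values():
--         school = data['School']
--         if school not in schools:
--             schools.append(school)
--     # Pass 2: one filtering comprehension per school.
--     return {school: [student_id for student_id, data in student.items()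
--                      if data['School'] == school]
--             for school in schools}
-- ===== Notes on version B (the rewrite author's own statement) =====
-- stated objective: alternative
-- what changed: Replaces A's single-pass dict-building loop (create-key-then-append per student) by a two-phase decomposition: first collect the distinct schools in order of first appearance, then build the result with one filtering comprehension per school.
import Mathlib
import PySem

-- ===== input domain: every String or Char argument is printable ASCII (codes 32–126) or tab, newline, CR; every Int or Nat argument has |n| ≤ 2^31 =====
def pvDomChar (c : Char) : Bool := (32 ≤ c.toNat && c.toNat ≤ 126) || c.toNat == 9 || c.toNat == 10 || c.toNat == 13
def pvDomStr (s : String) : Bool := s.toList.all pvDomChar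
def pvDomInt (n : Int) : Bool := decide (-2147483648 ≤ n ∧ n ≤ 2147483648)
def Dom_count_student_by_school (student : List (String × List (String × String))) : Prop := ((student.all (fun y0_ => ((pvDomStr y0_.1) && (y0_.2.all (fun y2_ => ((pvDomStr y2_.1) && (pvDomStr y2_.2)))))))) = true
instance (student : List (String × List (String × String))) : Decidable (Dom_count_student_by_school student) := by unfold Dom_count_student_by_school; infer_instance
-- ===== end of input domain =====

-- B groups student ids by school in two phases (distinct schools first, then one filter per school)
-- instead of A's single dict-building loop; same result, a different decomposition (not faster).

-- ===== PORT A =====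
def count_student_by_school (student : List (String × List (String × String))) : List (String × List String) :=
  (student.foldl (fun schools p =>
      match (PySem.Dict.mk p.2).get? "School" with    -- student_data['School']; none = KeyError, excluded by Pre_
      | none => schools
      | some school =>
        let schools := if schools.contains school then schools else schools.insert school []
        schools.modify school [] (fun l => l ++ [p.1]))
    PySem.Dict.empty).items

-- ===== PORT B =====
def count_student_by_school_alt (student : List (String × List (String × String))) : List (String × List String) :=
  let schools : PySem.Set String := student.foldl (fun acc p =>
      match (PySem.Dict.mk p.2).get? "School" with    -- data['School']; none = KeyError, excluded by Pre_
      | none => acc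
      | some school => PySem.Set.add acc school) PySem.Set.empty
  schools.map (fun school => (school,
    student.filterMap (fun p =>
      if (PySem.Dict.mk p.2).get? "School" = some school then some p.1 else none)))

-- ===== PRECONDITION & SPEC =====
-- Pre_ excludes exactly the inputs where some student record lacks the 'School' key,
-- on which the Python A raises KeyError (it never returns there).
def Pre_count_student_by_school (student : List (String × List (String × String))) : Prop :=
  ∀ p ∈ student, ((PySem.Dict.mk p.2).get? "School").isSome = true
instance (student : List (String × List (String × String))) : Decidable (Pre_count_student_by_school student) := by unfold Pre_count_student_by_school; infer_instance

def pvWitness_count_student_by_school : (List (String × List (String × String))) :=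
  [("alice", [("School", "NTU"), ("Age", "20")]), ("bob", [("School", "NUS")]), ("carol", [("School", "NTU")])]

def Spec_count_student_by_school (student : List (String × List (String × String))) (out : List (String × List String)) : Prop := out = count_student_by_school_alt student
instance (student : List (String × List (String × String))) (out : List (String × List String)) : Decidable (Spec_count_student_by_school student out) := by unfold Spec_count_student_by_school; infer_instance

-- ===== CLAIM (what is proved, stated in full; the proofs are below) =====
def Claim_equal_count_student_by_school : Prop := ∀ (student : List (String × List (String × String))), Dom_count_student_by_school student → Pre_count_student_by_school student → Spec_count_student_by_school student (count_student_by_school student)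

-- ===== LEMMAS AND PROOFS =====

-- the total key function the proofs factor both loops through (under Pre_ the default is unreachable)
def pvKey (p : String × List (String × String)) : String :=
  ((PySem.Dict.mk p.2).get? "School").getD ""

-- A's loop body = a plain modify (the conditional key-creation is absorbed by modify's default)
lemma stepA_eq_modify (d : PySem.Dict String (List String)) (k : String) (v : String) :
    ((if d.contains k then d else d.insert k []).modify k [] (fun l => l ++ [v]))
      = d.modify k [] (fun l => l ++ [v]) := by
  by_cases h : d.contains k = true
  · simp [h]
  · have h' : d.contains k = false := by simpa using h
    simp [h', PySem.Dict.modify, PySem.Dict.insert_insert_self,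
      PySem.Dict.getD_insert_self, PySem.Dict.getD_of_not_contains (h := h')]

-- under Pre_, A's fold equals the modify-fold keyed by pvKey
lemma foldA_eq (student : List (String × List (String × String)))
    (h : Pre_count_student_by_school student) (d : PySem.Dict String (List String)) :
    student.foldl (fun schools p =>
      match (PySem.Dict.mk p.2).get? "School" with
      | none => schools
      | some school =>
        let schools := if schools.contains school then schools else schools.insert school []
        schools.modify school [] (fun l => l ++ [p.1])) d
    = student.foldl (fun d p => d.modify (pvKey p) [] (fun l => l ++ [p.1])) d := by
  induction student generalizing d with
  | nil => rfl
  | cons p t ih =>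
    have hp := h p (by simp)
    obtain ⟨s, hs⟩ := Option.isSome_iff_exists.mp hp
    simp only [List.foldl_cons, hs]
    rw [ih (fun q hq => h q (by simp [hq]))]
    congr 1
    rw [stepA_eq_modify]
    simp [pvKey, hs]

-- under Pre_, B's first pass is the Set of keys
lemma foldB_eq (student : List (String × List (String × String)))
    (h : Pre_count_student_by_school student) (s : PySem.Set String) :
    student.foldl (fun acc p =>
      match (PySem.Dict.mk p.2).get? "School" with
      | none => acc
      | some school => PySem.Set.add acc school) s
    = (student.map pvKey).foldl PySem.Set.add s := by
  induction student generalizing s with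
  | nil => rfl
  | cons p t ih =>
    have hp := h p (by simp)
    obtain ⟨k, hk⟩ := Option.isSome_iff_exists.mp hp
    simp only [List.foldl_cons, List.map_cons, hk]
    rw [ih (fun q hq => h q (by simp [hq]))]
    congr 1
    simp [pvKey, hk]

-- under Pre_, B's per-school filterMap is the filtered projection of the (key, id) pairs
lemma filterMap_eq (student : List (String × List (String × String)))
    (h : Pre_count_student_by_school student) (c : String) :
    student.filterMap (fun p =>
      if (PySem.Dict.mk p.2).get? "School" = some c then some p.1 else none)
    = ((student.map (fun p => (pvKey p, p.1))).filter (fun q => q.1 == c)).map (·.2) := by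
  induction student with
  | nil => rfl
  | cons p t ih =>
    have hp := h p (by simp)
    obtain ⟨k, hk⟩ := Option.isSome_iff_exists.mp hp
    have hkey : pvKey p = k := by simp [pvKey, hk]
    simp only [List.filterMap_cons, List.map_cons, List.filter_cons, hk, hkey]
    by_cases hc : k = c
    · simp [hc, ih (fun q hq => h q (by simp [hq]))]
    · simp [hc, ih (fun q hq => h q (by simp [hq]))]

-- ===== VERDICT (by name: the statement is the Claim_ definition above) =====
theorem count_student_by_school_spec : Claim_equal_count_student_by_school := by
  intro student _ hpre
  unfold Spec_count_student_by_school count_student_by_school count_student_by_school_alt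
  rw [foldA_eq student hpre, foldB_eq student hpre]
  set l := student.map (fun p => (pvKey p, p.1)) with hl
  have hfold : student.foldl (fun d p => d.modify (pvKey p) [] (fun lst => lst ++ [p.1])) PySem.Dict.empty
      = l.foldl (fun d q => d.modify q.1 [] (fun lst => lst ++ [q.2])) PySem.Dict.empty := by
    rw [hl, List.foldl_map]
  rw [hfold]
  have hnd : (l.foldl (fun d q => d.modify q.1 [] (fun lst => lst ++ [q.2])) PySem.Dict.empty).keys.Nodup := by
    exact PySem.Dict.nodup_keys_foldl_modify_key l Prod.fst [] (fun d q => fun lst => lst ++ [q.2]) PySem.Dict.empty (by simp)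
  rw [PySem.Dict.items_eq_map_keys _ hnd []]
  have hkeys : (l.foldl (fun d q => d.modify q.1 [] (fun lst => lst ++ [q.2])) PySem.Dict.empty).keys
      = (student.map pvKey).foldl PySem.Set.add PySem.Set.empty := by
    have hmap : List.map Prod.fst l = student.map pvKey := by simp [hl, List.map_map]
    rw [PySem.Dict.keys_foldl_modify_key, hmap]
    simp [PySem.Dict.keys_empty, PySem.Set.update_nil_left, PySem.Set.ofList_eq_foldl]
  rw [hkeys]
  apply List.map_congr_left
  intro c _
  congr 1
  · rw [PySem.Dict.getD_foldl_modify_append]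
    rw [filterMap_eq student hpre c]
    rw [← hl]
    simp [PySem.Dict.getD_empty]
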